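-- pv_equiv track=rewrite | github.com/Bernad0t/signals | hom6/main.py | vec_times_mat_mod2
-- ===== SOURCE A (Python) =====
-- from typing import Dict, FrozenSet, Iterable, List, Sequence, Set, Tuple
--
-- def vec_times_mat_mod2(u: Sequence[int], G: Sequence[Sequence[int]]) -> List[int]:
--     # u: 1 x k, G: k x n
--     k = len(G)
--     n = len(G[0])
--     out = [0] * n
--     for i in range(k):
--         if u[i] == 0:
--             continue
--         row = G[i]
--         for j in range(n):
--             out[j] ^= row[j]
--     return out
-- ===== SOURCE B (Python) =====
-- def vec_times_mat_mod2(u, G):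
--     # column-major: compute each output column independently
--     n = len(G[0])
--     out = []
--     for j in range(n):
--         acc = 0
--         for i, row in enumerate(G):
--             if u[i]:
--                 acc ^= row[j]
--         out.append(acc)
--     return out
-- ===== Notes on version B (the rewrite author's own statement) =====
-- stated objective: alternative
-- what changed: B computes the result column-by-column (for each column j, fold XOR over the selected rows) instead of A's row-major pass that accumulates the whole output vector in place.
import Mathlib
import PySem

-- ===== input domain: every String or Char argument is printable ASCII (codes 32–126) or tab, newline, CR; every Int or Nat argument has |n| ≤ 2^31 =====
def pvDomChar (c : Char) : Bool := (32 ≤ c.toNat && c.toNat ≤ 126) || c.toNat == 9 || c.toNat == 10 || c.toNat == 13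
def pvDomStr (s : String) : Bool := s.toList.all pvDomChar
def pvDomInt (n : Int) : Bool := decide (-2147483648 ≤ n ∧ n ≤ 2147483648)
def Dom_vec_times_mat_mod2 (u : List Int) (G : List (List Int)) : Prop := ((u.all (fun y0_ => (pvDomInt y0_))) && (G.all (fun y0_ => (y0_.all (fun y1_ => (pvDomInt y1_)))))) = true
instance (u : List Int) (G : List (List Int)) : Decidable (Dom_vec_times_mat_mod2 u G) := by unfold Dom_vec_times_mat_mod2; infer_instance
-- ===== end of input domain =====

-- B computes the result column-by-column (one XOR fold per column) instead of A's
-- in-place row-major accumulation; same cost, different traversal (objective: alternative).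


-- ===== PORT A =====
def vec_times_mat_mod2 (u : List Int) (G : List (List Int)) : List Int :=
  let k : Int := G.length
  let n : Int := (PySem.List.pyGetD G 0 []).length
  let out : List Int := List.replicate n.toNat 0
  (PySem.List.pyRange 0 k 1).foldl (fun out i =>
    if PySem.List.pyGetD u i 0 == 0 then out
    else
      let row := PySem.List.pyGetD G i []
      (PySem.List.pyRange 0 n 1).foldl (fun o j =>
        PySem.List.pySetD o j (PySem.Int.bxor (PySem.List.pyGetD o j 0) (PySem.List.pyGetD row j 0))) out) out

-- ===== PORT B =====
def vec_times_mat_mod2_alt (u : List Int) (G : List (List Int)) : List Int :=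
  let n : Int := (PySem.List.pyGetD G 0 []).length
  (PySem.List.pyRange 0 n 1).map (fun j =>
    (PySem.List.enumerate G 0).foldl (fun acc p =>
      if PySem.List.pyGetD u p.1 0 ≠ 0 then PySem.Int.bxor acc (PySem.List.pyGetD p.2 j 0) else acc) 0)

-- ===== PRECONDITION & SPEC =====
-- Pre_ excludes exactly the inputs where A raises IndexError: empty G (len(G[0])),
-- u shorter than the number of rows, or a selected row (u[i] != 0) shorter than len(G[0]).
def Pre_vec_times_mat_mod2 (u : List Int) (G : List (List Int)) : Prop :=
  G ≠ [] ∧ G.length ≤ u.length ∧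
    ∀ i : Nat, i < G.length → u.getD i 0 ≠ 0 → (G.headD []).length ≤ (G.getD i []).length
instance (u : List Int) (G : List (List Int)) : Decidable (Pre_vec_times_mat_mod2 u G) := by
  unfold Pre_vec_times_mat_mod2; infer_instance

def pvWitness_vec_times_mat_mod2 : List Int × List (List Int) := ([1, 0], [[1, 2], [3, 4]])

def Spec_vec_times_mat_mod2 (u : List Int) (G : List (List Int)) (out : List Int) : Prop := out = vec_times_mat_mod2_alt u G
instance (u : List Int) (G : List (List Int)) (out : List Int) : Decidable (Spec_vec_times_mat_mod2 u G out) := by unfold Spec_vec_times_mat_mod2; infer_instance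

-- ===== CLAIM (what is proved, stated in full; the proofs are below) =====
def Claim_equal_vec_times_mat_mod2 : Prop := ∀ (u : List Int) (G : List (List Int)), Dom_vec_times_mat_mod2 u G → Pre_vec_times_mat_mod2 u G → Spec_vec_times_mat_mod2 u G (vec_times_mat_mod2 u G)

-- ===== LEMMAS AND PROOFS =====

-- common per-column spec: XOR-fold over (u-entry, row) pairs
def zfold (j : Int) (ps : List (Int × List Int)) (a : Int) : Int :=
  ps.foldl (fun acc p => if p.1 ≠ 0 then PySem.Int.bxor acc (PySem.List.pyGetD p.2 j 0) else acc) a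

lemma pyGetD_G_zero (G : List (List Int)) :
    PySem.List.pyGetD G 0 ([] : List Int) = G.headD [] := by
  cases G <;> simp [PySem.List.pyGetD_zero]

-- A's inner loop is pointwise XOR with the row
lemma inner_loop (row : List Int) :
    ∀ (m : Nat) (out : List Int), m ≤ out.length → out.length ≤ row.length →
    (PySem.List.pyRange 0 (m : Int) 1).foldl (fun o j =>
        PySem.List.pySetD o j (PySem.Int.bxor (PySem.List.pyGetD o j 0) (PySem.List.pyGetD row j 0))) out
      = List.zipWith PySem.Int.bxor (out.take m) (row.take m) ++ out.drop m := by
  intro m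
  induction m with
  | zero => intro out _ _; simp [PySem.List.pyRange_one_eq_nil]
  | succ m ih =>
    intro out hm hr
    rw [show ((m + 1 : Nat) : Int) = (m : Int) + 1 by push_cast; ring]
    rw [PySem.List.pyRange_one_succ_right (show (0 : Int) ≤ (m : Int) by omega), List.foldl_append]
    rw [ih out (by omega) hr]
    simp only [List.foldl_cons, List.foldl_nil]
    have hmo : m < out.length := by omega
    have hmr : m < row.length := by omega
    have hlenz : (List.zipWith PySem.Int.bxor (out.take m) (row.take m)).length = m := by
      simp; omega
    have hget : PySem.List.pyGetD
        (List.zipWith PySem.Int.bxor (out.take m) (row.take m) ++ out.drop m) (m : Int) 0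
        = out[m] := by
      rw [PySem.List.pyGetD_natCast, List.getD_eq_getElem?_getD,
        List.getElem?_append_right (by omega)]
      simp [hlenz, hmo]
    have hrow : PySem.List.pyGetD row (m : Int) 0 = row[m] := by
      rw [PySem.List.pyGetD_natCast, List.getD_eq_getElem?_getD]
      simp [hmr]
    rw [hget, hrow, PySem.List.pySetD_natCast]
    rw [List.set_append_right _ _ (by omega), hlenz, Nat.sub_self]
    rw [List.drop_eq_getElem_cons hmo]
    simp only [List.set_cons_zero]
    rw [List.take_add_one, List.take_add_one]
    simp only [List.getElem?_eq_getElem hmo, List.getElem?_eq_getElem hmr, Option.toList_some]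
    rw [List.zipWith_append (by simp; omega)]
    simp [List.append_assoc]

-- A's outer loop, with per-column characterisation
lemma outer_loop (u : List Int) (G : List (List Int)) (n : Nat)
    (hu : G.length ≤ u.length)
    (hrows : ∀ i : Nat, i < G.length → u.getD i 0 ≠ 0 → n ≤ (G.getD i []).length) :
    ∀ (m s : Nat) (out : List Int), G.length = s + m → out.length = n →
    (PySem.List.pyRange (s : Int) (G.length : Int) 1).foldl (fun out i =>
      if PySem.List.pyGetD u i 0 == 0 then out
      else
        (PySem.List.pyRange 0 (n : Int) 1).foldl (fun o j =>
          PySem.List.pySetD o j (PySem.Int.bxor (PySem.List.pyGetD o j 0)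
            (PySem.List.pyGetD (PySem.List.pyGetD G i []) j 0))) out) out
    = (PySem.List.pyRange 0 (n : Int) 1).map
        (fun j => zfold j (List.zip (u.drop s) (G.drop s)) (PySem.List.pyGetD out j 0)) := by
  intro m
  induction m with
  | zero =>
    intro s out hs hlen
    rw [PySem.List.pyRange_one_eq_nil (show (G.length : Int) ≤ (s : Int) by omega)]
    have hds : G.drop s = [] := by apply List.drop_eq_nil_of_le; omega
    simp only [List.foldl_nil, hds, List.zip_nil_right, zfold, List.foldl_nil]
    have h := PySem.List.map_pyGetD_pyRange_zero out (0 : Int)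
    rw [PySem.List.len_eq, hlen] at h
    exact h.symm
  | succ m ih =>
    intro s out hs hlen
    have hsG : s < G.length := by omega
    have hsu : s < u.length := by omega
    rw [PySem.List.pyRange_one_cons (a := (s : Int)) (b := (G.length : Int))
      (by exact_mod_cast hsG), List.foldl_cons]
    have hgu : PySem.List.pyGetD u (s : Int) 0 = u[s] := by
      rw [PySem.List.pyGetD_natCast, List.getD_eq_getElem?_getD]; simp [hsu]
    have hgG : PySem.List.pyGetD G (s : Int) ([] : List Int) = G[s] := by
      rw [PySem.List.pyGetD_natCast, List.getD_eq_getElem?_getD]; simp [hsG]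
    have hdu : u.drop s = u[s] :: u.drop (s + 1) := List.drop_eq_getElem_cons hsu
    have hdG : G.drop s = G[s] :: G.drop (s + 1) := List.drop_eq_getElem_cons hsG
    have hcast : ((s : Int) + 1) = ((s + 1 : Nat) : Int) := by push_cast; ring
    by_cases hz : u[s] = 0
    · rw [if_pos (by rw [hgu]; exact beq_iff_eq.mpr hz)]
      rw [hcast, ih (s + 1) out (by omega) hlen]
      apply List.map_congr_left; intro j _
      rw [hdu, hdG]
      simp only [zfold, List.zip_cons_cons, List.foldl_cons]
      simp [hz]
    · rw [if_neg (by rw [hgu]; simp [hz])]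
      have hgd : u.getD s 0 ≠ 0 := by
        rw [List.getD_eq_getElem?_getD]; simp [hsu, hz]
      have hrlen : n ≤ G[s].length := by
        have h := hrows s hsG hgd
        rw [List.getD_eq_getElem?_getD, List.getElem?_eq_getElem hsG] at h
        simpa using h
      rw [hgG, inner_loop G[s] n out (by omega) (by omega)]
      have hout' : (List.zipWith PySem.Int.bxor (out.take n) (G[s].take n) ++ out.drop n).length = n := by
        simp; omega
      rw [hcast, ih (s + 1) _ (by omega) hout']
      apply List.map_congr_left; intro j hj
      have hjm := (PySem.List.mem_pyRange_one).mp hj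
      have hj0 : 0 ≤ j := hjm.1
      have hjn : j < (n : Int) := hjm.2
      have hjlt : j.toNat < n := by omega
      have hgo : PySem.List.pyGetD
          (List.zipWith PySem.Int.bxor (out.take n) (G[s].take n) ++ out.drop n) j 0
          = PySem.Int.bxor (PySem.List.pyGetD out j 0) (PySem.List.pyGetD G[s] j 0) := by
        rw [PySem.List.pyGetD_eq_getElem _ 0 hj0 (by rw [hout']; exact_mod_cast hjn),
          PySem.List.pyGetD_eq_getElem out 0 hj0 (by exact_mod_cast (by omega : j < (out.length : Int))),
          PySem.List.pyGetD_eq_getElem G[s] 0 hj0 (by exact_mod_cast (by omega : j < (G[s].length : Int)))]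
        rw [List.getElem_append_left (by simp; omega)]
        simp
      rw [hgo, hdu, hdG]
      simp only [zfold, List.zip_cons_cons, List.foldl_cons]
      simp [hz]

-- B's enumerate fold is the per-column spec
lemma b_fold (u : List Int) (j : Int) :
    ∀ (rows : List (List Int)) (s : Nat) (a : Int), s + rows.length ≤ u.length →
    (PySem.List.enumerate rows (s : Int)).foldl (fun acc p =>
        if PySem.List.pyGetD u p.1 0 ≠ 0 then PySem.Int.bxor acc (PySem.List.pyGetD p.2 j 0) else acc) a
      = zfold j (List.zip (u.drop s) rows) a := by
  intro rows
  induction rows with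
  | nil => intro s a _; simp [PySem.List.enumerate_nil, zfold]
  | cons r rows ih =>
    intro s a hs
    have hsu : s < u.length := by simp at hs; omega
    have hgu : PySem.List.pyGetD u (s : Int) 0 = u[s] := by
      rw [PySem.List.pyGetD_natCast, List.getD_eq_getElem?_getD]; simp [hsu]
    rw [PySem.List.enumerate_cons, List.foldl_cons]
    have hcast : ((s : Int) + 1) = ((s + 1 : Nat) : Int) := by push_cast; ring
    rw [hcast, ih (s + 1) _ (by simp at hs ⊢; omega)]
    rw [List.drop_eq_getElem_cons hsu]
    simp only [List.zip_cons_cons, zfold, List.foldl_cons, hgu]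

lemma pyGetD_replicate_zero (n : Nat) (j : Int) (h0 : 0 ≤ j) (hn : j < (n : Int)) :
    PySem.List.pyGetD (List.replicate n (0 : Int)) j 0 = 0 := by
  rw [PySem.List.pyGetD_eq_getElem _ 0 h0 (by simpa using hn)]
  simp

-- ===== VERDICT (by name: the statement is the Claim_ definition above) =====
theorem vec_times_mat_mod2_spec : Claim_equal_vec_times_mat_mod2 := by
  intro u G _ hpre
  obtain ⟨hne, hlen, hrows⟩ := hpre
  unfold Spec_vec_times_mat_mod2 vec_times_mat_mod2 vec_times_mat_mod2_alt
  simp only [pyGetD_G_zero]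
  set n : Nat := (G.headD []).length with hn
  have hA := outer_loop u G n hlen hrows G.length 0 (List.replicate ((n : Int)).toNat 0)
    (by omega) (by simp)
  simp only [Nat.cast_zero] at hA
  rw [hA]
  apply List.map_congr_left
  intro j hj
  have hjm := (PySem.List.mem_pyRange_one).mp hj
  have hb := b_fold u j G 0 0 (by simpa using hlen)
  simp only [Nat.cast_zero, List.drop_zero] at hb
  rw [hb]
  simp only [List.drop_zero, Int.toNat_natCast]
  rw [pyGetD_replicate_zero n j hjm.1 hjm.2]
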